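-- pv_equiv track=rewrite | github.com/thermotools/thermopack | addon/pyUtils/generate_dependensies.py | build_make_string
-- ===== SOURCE A (Python) =====
-- import math
--
-- N_FILE_PER_LINE = 2
--
-- def build_make_string(filepath, deps):
--     """
--     Make list containg build nformation for file (filepath)
--     with dependencies (deps)
--     """
--     filename_src = filepath.split("/")[-1]
--     fend = filepath.split(".")[-1]
--     filename_o = filename_src.replace(fend, "o")
--     lines = []
--     # Only process FORTRAN files
--     if fend == "f90":
--         if len(deps) == 0:
--             line_end = ""
--         else:
--             line_end = " \\"
--         lines.append("$(ODIR)/" + filename_o + ": $(SRC)/" + filename_src + line_end)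
--
--         # Loop dependencies
--         nMax = len(deps)
--         for i in range(math.ceil(nMax/N_FILE_PER_LINE)):
--             line = "\t"
--             jmax = min(nMax-i*N_FILE_PER_LINE, N_FILE_PER_LINE)
--             for j in range(jmax):
--                 jj = i*N_FILE_PER_LINE+j
--                 if j == jmax-1:
--                     if jj == nMax-1:
--                         line += "$(SRC)/" + deps[jj] + ".f90"
--                     else:
--                         line += "$(SRC)/" + deps[jj] + ".f90 \\"
--                 else:
--                     line += "$(SRC)/" + deps[jj] + ".f90 "
--             lines.append(line)
--         lines.append("\t" + "@$(call make_object, $(SRC)/" + filename_src + ")")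
--     return lines
-- ===== SOURCE B (Python) =====
-- N_FILE_PER_LINE = 2
--
--
-- def _chunks(tokens):
--     """Split tokens into consecutive groups of N_FILE_PER_LINE."""
--     if len(tokens) <= N_FILE_PER_LINE:
--         return [tokens] if tokens else []
--     return [tokens[:N_FILE_PER_LINE]] + _chunks(tokens[N_FILE_PER_LINE:])
--
--
-- def _emit(chunks):
--     """One tab-indented line per group; every line but the last continues with ' \\'."""
--     if not chunks:
--         return []
--     if len(chunks) == 1:
--         return ["\t" + " ".join(chunks[0])]
--     return ["\t" + " ".join(chunks[0]) + " \\"] + _emit(chunks[1:])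
--
--
-- def build_make_string(filepath, deps):
--     """
--     Make list containg build nformation for file (filepath)
--     with dependencies (deps)
--     """
--     filename_src = filepath.split("/")[-1]
--     fend = filepath.split(".")[-1]
--     if fend != "f90":
--         return []
--     filename_o = filename_src.replace(fend, "o")
--     tokens = ["$(SRC)/" + d + ".f90" for d in deps]
--     header = ("$(ODIR)/" + filename_o + ": $(SRC)/" + filename_src
--               + (" \\" if tokens else ""))
--     footer = "\t" + "@$(call make_object, $(SRC)/" + filename_src + ")"
--     return [header] + _emit(_chunks(tokens)) + [footer]
-- ===== Notes on version B (the rewrite author's own statement) =====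
-- stated objective: simpler
-- what changed: Replaces A's index-arithmetic nested loops (ceil(n/2) outer iterations, jmax/last-item checks on absolute indices) by a flat tokens -> chunks-of-2 -> join-and-annotate pipeline: build '$(SRC)/<dep>.f90' tokens, chunk them, emit '\t'+' '.join(chunk) with ' \\' on every chunk line but the last.
import Mathlib
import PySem

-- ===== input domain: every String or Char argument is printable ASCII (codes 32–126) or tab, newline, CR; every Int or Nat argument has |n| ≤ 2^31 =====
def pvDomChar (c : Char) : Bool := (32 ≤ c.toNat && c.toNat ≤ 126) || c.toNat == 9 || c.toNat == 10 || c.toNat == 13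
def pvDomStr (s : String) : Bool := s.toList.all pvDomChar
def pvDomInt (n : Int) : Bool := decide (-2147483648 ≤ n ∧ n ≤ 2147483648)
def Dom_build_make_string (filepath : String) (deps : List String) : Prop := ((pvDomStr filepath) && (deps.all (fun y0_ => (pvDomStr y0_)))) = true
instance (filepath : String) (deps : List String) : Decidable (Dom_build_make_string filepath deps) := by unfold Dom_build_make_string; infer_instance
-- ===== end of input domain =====

-- B builds the dependency block as tokens -> chunks-of-2 -> join-and-annotate instead of A's
-- index-arithmetic nested loops; same return value, no speed claim.

-- ===== PORT A =====
-- Literal port of A. math.ceil(nMax/N_FILE_PER_LINE) is exact as (nMax+1)/2 on Nat for these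
-- sizes; deps[jj] is always in range where the loop reads it, ported as getD.
def build_make_string (filepath : String) (deps : List String) : List String :=
  let filename_src := PySem.List.pyGetD ((PySem.Str.split? filepath "/").getD []) (-1) ""
  let fend := PySem.List.pyGetD ((PySem.Str.split? filepath ".").getD []) (-1) ""
  let filename_o := PySem.Str.replace filename_src fend "o"
  if fend == "f90" then
    let line_end := if deps.length == 0 then "" else " \\"
    let lines : List String := ["$(ODIR)/" ++ filename_o ++ ": $(SRC)/" ++ filename_src ++ line_end]
    let nMax := deps.length
    let lines := (List.range ((nMax + 1) / 2)).foldl (fun lines i =>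
      let jmax := min (nMax - i * 2) 2
      let line := (List.range jmax).foldl (fun line j =>
        let jj := i * 2 + j
        if j == jmax - 1 then
          if jj == nMax - 1 then line ++ "$(SRC)/" ++ deps.getD jj "" ++ ".f90"
          else line ++ "$(SRC)/" ++ deps.getD jj "" ++ ".f90 \\"
        else line ++ "$(SRC)/" ++ deps.getD jj "" ++ ".f90 ") "\t"
      lines ++ [line]) lines
    lines ++ ["\t" ++ "@$(call make_object, $(SRC)/" ++ filename_src ++ ")"]
  else []

-- ===== PORT B =====
-- B-side helper: consecutive groups of N_FILE_PER_LINE (= 2) tokens (Source B `_chunks`).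
def bms_chunks (tokens : List String) : List (List String) :=
  if tokens.length ≤ 2 then (if tokens.isEmpty then [] else [tokens])
  else tokens.take 2 :: bms_chunks (tokens.drop 2)
termination_by tokens.length
decreasing_by simp [List.length_drop]; omega

-- B-side helper: one tab-indented line per group, ' \' on all but the last (Source B `_emit`).
def bms_emit : List (List String) → List String
  | [] => []
  | [c] => ["\t" ++ PySem.Str.join " " c]
  | c :: c' :: cs => ("\t" ++ PySem.Str.join " " c ++ " \\") :: bms_emit (c' :: cs)

def build_make_string_alt (filepath : String) (deps : List String) : List String :=
  let filename_src := PySem.List.pyGetD ((PySem.Str.split? filepath "/").getD []) (-1) ""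
  let fend := PySem.List.pyGetD ((PySem.Str.split? filepath ".").getD []) (-1) ""
  if fend == "f90" then
    let filename_o := PySem.Str.replace filename_src fend "o"
    let tokens := deps.map (fun d => "$(SRC)/" ++ d ++ ".f90")
    let header := "$(ODIR)/" ++ filename_o ++ ": $(SRC)/" ++ filename_src ++
      (if tokens.isEmpty then "" else " \\")
    let footer := "\t" ++ "@$(call make_object, $(SRC)/" ++ filename_src ++ ")"
    header :: (bms_emit (bms_chunks tokens) ++ [footer])
  else []

-- ===== PRECONDITION & SPEC =====
def Spec_build_make_string (filepath : String) (deps : List String) (out : List String) : Prop := out = build_make_string_alt filepath deps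
instance (filepath : String) (deps : List String) (out : List String) : Decidable (Spec_build_make_string filepath deps out) := by unfold Spec_build_make_string; infer_instance

-- ===== CLAIM (what is proved, stated in full; the proofs are below) =====
def Claim_equal_build_make_string : Prop := ∀ (filepath : String) (deps : List String), Dom_build_make_string filepath deps → Spec_build_make_string filepath deps (build_make_string filepath deps)

-- ===== LEMMAS AND PROOFS =====

-- The line A's outer loop appends at index i (A's inner loop with the let-bindings substituted).
def bmsLineA (deps : List String) (nMax i : Nat) : String :=
  (List.range (min (nMax - i * 2) 2)).foldl (fun line j =>
    if j == min (nMax - i * 2) 2 - 1 then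
      if i * 2 + j == nMax - 1 then line ++ "$(SRC)/" ++ deps.getD (i * 2 + j) "" ++ ".f90"
      else line ++ "$(SRC)/" ++ deps.getD (i * 2 + j) "" ++ ".f90 \\"
    else line ++ "$(SRC)/" ++ deps.getD (i * 2 + j) "" ++ ".f90 ") "\t"

lemma bms_foldl_lines (deps : List String) (nMax k : Nat) (init : List String) :
    (List.range k).foldl (fun lines i =>
      lines ++ [(List.range (min (nMax - i * 2) 2)).foldl (fun line j =>
        if j == min (nMax - i * 2) 2 - 1 then
          if i * 2 + j == nMax - 1 then line ++ "$(SRC)/" ++ deps.getD (i * 2 + j) "" ++ ".f90"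
          else line ++ "$(SRC)/" ++ deps.getD (i * 2 + j) "" ++ ".f90 \\"
        else line ++ "$(SRC)/" ++ deps.getD (i * 2 + j) "" ++ ".f90 ") "\t"]) init
    = init ++ (List.range k).map (bmsLineA deps nMax) := by
  induction k generalizing init with
  | zero => simp
  | succ k ih =>
    rw [List.range_succ, List.foldl_append, ih]
    simp only [List.foldl_cons, List.foldl_nil, List.map_append, List.map_cons, List.map_nil,
      List.append_assoc]
    rfl

lemma bms_join_pair (x y : String) : PySem.Str.join " " [x, y] = x ++ " " ++ y := by
  apply String.toList_inj.mp
  simp [PySem.Str.join, PySem.Chars.join_cons_cons, PySem.Chars.join_singleton]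

lemma bms_chunks_ne_nil (xs : List String) (h : xs ≠ []) : bms_chunks xs ≠ [] := by
  rw [bms_chunks]
  split_ifs <;> simp_all

lemma bmsLineA_shift (d1 d2 : String) (rest : List String) (i : Nat) :
    bmsLineA (d1 :: d2 :: rest) (rest.length + 2) (i + 1) = bmsLineA rest rest.length i := by
  have hg0 : (d1 :: d2 :: rest).getD ((i + 1) * 2 + 0) "" = rest.getD (i * 2 + 0) "" := by
    have h : (i + 1) * 2 + 0 = (i * 2 + 0) + 1 + 1 := by ring
    rw [h]; rfl
  have hg1 : (d1 :: d2 :: rest).getD ((i + 1) * 2 + 1) "" = rest.getD (i * 2 + 1) "" := by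
    have h : (i + 1) * 2 + 1 = (i * 2 + 1) + 1 + 1 := by ring
    rw [h]; rfl
  unfold bmsLineA
  have hm : rest.length + 2 - (i + 1) * 2 = rest.length - i * 2 := by omega
  rw [hm]
  have h3 : rest.length - i * 2 = 0 ∨ rest.length - i * 2 = 1 ∨ 2 ≤ rest.length - i * 2 := by omega
  rcases h3 with h | h | h
  · simp [h]
  · have hmin : min (rest.length - i * 2) 2 = 1 := by omega
    have hn : rest.length = i * 2 + 1 := by omega
    rw [hmin]
    have hr : List.range 1 = [0] := rfl
    rw [hr]
    simp only [List.foldl_cons, List.foldl_nil, beq_iff_eq]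
    split_ifs <;> first | omega | (rw [hg0])
  · have hmin : min (rest.length - i * 2) 2 = 2 := by omega
    have hn : i * 2 + 2 ≤ rest.length := by omega
    rw [hmin]
    have hr : List.range 2 = [0, 1] := rfl
    rw [hr]
    simp only [List.foldl_cons, List.foldl_nil, beq_iff_eq]
    split_ifs <;> first | omega | (rw [hg0, hg1])

lemma bms_head (d1 d2 : String) (rest : List String) (h : rest ≠ []) :
    bmsLineA (d1 :: d2 :: rest) (rest.length + 2) 0
      = "\t" ++ "$(SRC)/" ++ d1 ++ ".f90 " ++ "$(SRC)/" ++ d2 ++ ".f90 \\" := by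
  have hlen : rest.length ≠ 0 := fun hh => h (List.length_eq_zero_iff.mp hh)
  unfold bmsLineA
  have hmin : min (rest.length + 2 - 0 * 2) 2 = 2 := by
    rw [Nat.zero_mul, Nat.sub_zero]; omega
  rw [hmin]
  have hr : List.range 2 = [0, 1] := rfl
  rw [hr]
  simp only [List.foldl_cons, List.foldl_nil, beq_iff_eq]
  split_ifs <;> first | omega | rfl | exact (‹False›).elim

lemma bms_emit_cons_cons (p c : List String) (cs : List (List String)) :
    bms_emit (p :: c :: cs) = ("\t" ++ PySem.Str.join " " p ++ " \\") :: bms_emit (c :: cs) := rfl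

lemma bms_body_eq : ∀ (deps : List String),
    (List.range ((deps.length + 1) / 2)).map (bmsLineA deps deps.length)
      = bms_emit (bms_chunks (deps.map (fun d => "$(SRC)/" ++ d ++ ".f90")))
  | [] => by simp [bms_chunks, bms_emit]
  | [d] => by
      have h1 : PySem.Str.join " " ["$(SRC)/" ++ d ++ ".f90"] = "$(SRC)/" ++ d ++ ".f90" := by
        apply String.toList_inj.mp
        simp [PySem.Str.join, PySem.Chars.join_singleton]
      simp [bms_chunks, bms_emit, bmsLineA, h1]
      try (apply String.toList_inj.mp; simp)
  | [d1, d2] => by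
      simp [bms_chunks, bms_emit, bmsLineA, bms_join_pair, List.range_succ]
      try (apply String.toList_inj.mp; simp)
  | d1 :: d2 :: d3 :: rest' => by
      have ih := bms_body_eq (d3 :: rest')
      have e : (d1 :: d2 :: d3 :: rest').length = (d3 :: rest').length + 2 := by simp
      rw [e]
      have e2 : ((d3 :: rest').length + 2 + 1) / 2 = ((d3 :: rest').length + 1) / 2 + 1 := by omega
      rw [e2, List.range_succ_eq_map, List.map_cons, List.map_map]
      have hcomp : (bmsLineA (d1 :: d2 :: d3 :: rest') ((d3 :: rest').length + 2)) ∘ Nat.succ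
          = bmsLineA (d3 :: rest') (d3 :: rest').length := by
        funext i
        simpa [Nat.succ_eq_add_one] using bmsLineA_shift d1 d2 (d3 :: rest') i
      rw [hcomp, ih, bms_head d1 d2 (d3 :: rest') (by simp)]
      have hch : bms_chunks ((d1 :: d2 :: d3 :: rest').map (fun d => "$(SRC)/" ++ d ++ ".f90"))
          = ["$(SRC)/" ++ d1 ++ ".f90", "$(SRC)/" ++ d2 ++ ".f90"]
            :: bms_chunks ((d3 :: rest').map (fun d => "$(SRC)/" ++ d ++ ".f90")) := by
        rw [List.map_cons, List.map_cons, bms_chunks]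
        have hng : ¬((("$(SRC)/" ++ d1 ++ ".f90") :: ("$(SRC)/" ++ d2 ++ ".f90")
            :: (d3 :: rest').map (fun d => "$(SRC)/" ++ d ++ ".f90")).length ≤ 2) := by simp
        rw [if_neg hng]
        simp
      rw [hch]
      obtain ⟨c, cs, hcc⟩ : ∃ c cs,
          bms_chunks ((d3 :: rest').map (fun d => "$(SRC)/" ++ d ++ ".f90")) = c :: cs := by
        cases hx : bms_chunks ((d3 :: rest').map (fun d => "$(SRC)/" ++ d ++ ".f90")) with
        | nil => exact absurd hx (bms_chunks_ne_nil _ (by simp))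
        | cons c cs => exact ⟨c, cs, rfl⟩
      rw [hcc, bms_emit_cons_cons, ← hcc, bms_join_pair]
      congr 1
      apply String.toList_inj.mp
      simp


-- ===== VERDICT (by name: the statement is the Claim_ definition above) =====
theorem build_make_string_spec : Claim_equal_build_make_string := by
  intro filepath deps _
  show build_make_string filepath deps = build_make_string_alt filepath deps
  simp only [build_make_string, build_make_string_alt]
  by_cases h : (PySem.List.pyGetD ((PySem.Str.split? filepath ".").getD []) (-1) "" == "f90") = true
  · rw [if_pos h, if_pos h]
    rw [bms_foldl_lines, bms_body_eq]
    cases deps with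
    | nil => simp [bms_chunks, bms_emit]
    | cons d ds => simp
  · rw [if_neg h, if_neg h]
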